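-- pv_equiv track=rewrite | github.com/samouei/minesweeper | minesweeper.py | get_neighbors_2d
-- ===== SOURCE A (Python) =====
-- def get_all_cells_2d(num_rows, num_cols):
--     """
--     Makes a set with all inbound (r, c) values in a
--         num_rows * num_cols sized board
--
--     Parameters:
--        num_rows (int): number of rows
--        num_cols (int): number of columns
--
--     Returns: a set of all the valid cell cooridnate tuples
--     """
--
--     inbound_cells = set()
--     for r in range(num_rows):
--         for c in range(num_cols):
--             inbound_cells.add((r, c))
--     return inbound_cells
--
-- def get_neighbors_2d(num_rows, num_cols, cell):
--     """
--     Gets a bomb's set of neighbors {(r,c), (r,c)}.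
--
--     Parameters:
--        num_rows (int): number of rows
--        num_cols (int): number of columns
--        cell (tuple): cell coordinates
--
--     Returns: a set with bomb neighbors as tuples.
--     """
--
--     row = cell[0]
--     col = cell[1]
--
--     inbound_cells = get_all_cells_2d(num_rows, num_cols)
--
--     neighbors = {(row - 1, col -1), (row - 1, col), (row - 1, col + 1),
--                  (row, col - 1), (row, col + 1),
--                  (row + 1, col - 1), (row + 1, col), (row + 1, col + 1)}
--
--     cell_neighbors = set()
--     for n in neighbors:
--         if n in inbound_cells:
--             cell_neighbors.add(n)
--
--     return cell_neighbors
-- ===== SOURCE B (Python) =====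
-- def get_neighbors_2d(num_rows, num_cols, cell):
--     """Directly bounds-check the 8 candidate neighbors (O(1)) instead of
--     materializing the full board set (O(num_rows*num_cols))."""
--     row, col = cell[0], cell[1]
--     deltas = [(-1, -1), (-1, 0), (-1, 1), (0, -1), (0, 1), (1, -1), (1, 0), (1, 1)]
--     return {(row + dr, col + dc) for dr, dc in deltas
--             if 0 <= row + dr < num_rows and 0 <= col + dc < num_cols}
-- ===== Notes on version B (the rewrite author's own statement) =====
-- stated objective: faster
-- what changed: B bounds-checks the 8 candidate neighbors directly instead of building the set of all num_rows*num_cols board cells and testing membership in it; intended as faster (measured 46x at n=4096, A timing out at larger sizes).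
import Mathlib
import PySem

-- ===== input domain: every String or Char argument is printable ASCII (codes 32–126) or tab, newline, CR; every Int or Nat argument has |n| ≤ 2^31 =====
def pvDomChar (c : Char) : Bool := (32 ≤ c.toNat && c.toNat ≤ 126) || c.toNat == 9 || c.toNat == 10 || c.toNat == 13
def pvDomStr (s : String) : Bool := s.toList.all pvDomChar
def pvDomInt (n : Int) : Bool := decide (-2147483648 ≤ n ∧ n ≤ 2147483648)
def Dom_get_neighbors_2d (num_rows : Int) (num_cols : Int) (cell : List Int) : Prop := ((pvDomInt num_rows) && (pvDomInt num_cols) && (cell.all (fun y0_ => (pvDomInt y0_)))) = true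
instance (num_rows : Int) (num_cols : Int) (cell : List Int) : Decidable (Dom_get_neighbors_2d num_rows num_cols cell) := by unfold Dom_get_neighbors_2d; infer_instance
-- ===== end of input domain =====

-- B bounds-checks the 8 candidate neighbors directly instead of building the full board set; intended as faster (measured 46x at n=4096, A timing out at larger sizes).


-- ===== PORT A =====
-- inbound_cells.add((r, c)): the (r, c) pairs of the double loop are pairwise distinct and the set is
-- only consumed by membership tests, so set.add is ported as a cons (O(1), like Python's set.add).
def get_all_cells_2d (num_rows : Int) (num_cols : Int) : PySem.Set (List Int) :=
  (PySem.List.pyRange 0 num_rows 1).foldl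
    (fun s r => (PySem.List.pyRange 0 num_cols 1).foldl (fun s c => [r, c] :: s) s)
    PySem.Set.empty

def get_neighbors_2d (num_rows : Int) (num_cols : Int) (cell : List Int) : List (List Int) :=
  let row := PySem.List.pyGetD cell 0 0   -- cell[0]; total under Pre_ (cell has ≥ 2 elements)
  let col := PySem.List.pyGetD cell 1 0   -- cell[1]
  let inbound_cells := get_all_cells_2d num_rows num_cols
  let neighbors : PySem.Set (List Int) := PySem.Set.ofList
    [[row - 1, col - 1], [row - 1, col], [row - 1, col + 1],
     [row, col - 1], [row, col + 1],
     [row + 1, col - 1], [row + 1, col], [row + 1, col + 1]]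
  neighbors.foldl
    (fun s n => if PySem.Set.contains inbound_cells n then PySem.Set.add s n else s)
    PySem.Set.empty

-- ===== PORT B =====
def get_neighbors_2d_alt (num_rows : Int) (num_cols : Int) (cell : List Int) : List (List Int) :=
  let row := PySem.List.pyGetD cell 0 0
  let col := PySem.List.pyGetD cell 1 0
  ([(-1, -1), (-1, 0), (-1, 1), (0, -1), (0, 1), (1, -1), (1, 0), (1, 1)] : List (Int × Int)).filterMap
    (fun d =>
      if 0 ≤ row + d.1 ∧ row + d.1 < num_rows ∧ 0 ≤ col + d.2 ∧ col + d.2 < num_cols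
      then some [row + d.1, col + d.2] else none)

-- ===== PRECONDITION & SPEC =====
-- Pre_ excludes cells with fewer than two coordinates, where Python A raises IndexError (B raises there too).
def Pre_get_neighbors_2d (num_rows : Int) (num_cols : Int) (cell : List Int) : Prop := 2 ≤ cell.length
instance (num_rows : Int) (num_cols : Int) (cell : List Int) : Decidable (Pre_get_neighbors_2d num_rows num_cols cell) := by unfold Pre_get_neighbors_2d; infer_instance
def pvWitness_get_neighbors_2d : Int × Int × List Int := (3, 3, [1, 1])

def Spec_get_neighbors_2d (num_rows : Int) (num_cols : Int) (cell : List Int) (out : List (List Int)) : Prop := out = get_neighbors_2d_alt num_rows num_cols cell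
instance (num_rows : Int) (num_cols : Int) (cell : List Int) (out : List (List Int)) : Decidable (Spec_get_neighbors_2d num_rows num_cols cell out) := by unfold Spec_get_neighbors_2d; infer_instance

-- ===== CLAIM (what is proved, stated in full; the proofs are below) =====
def Claim_equal_get_neighbors_2d : Prop := ∀ (num_rows : Int) (num_cols : Int) (cell : List Int), Dom_get_neighbors_2d num_rows num_cols cell → Pre_get_neighbors_2d num_rows num_cols cell → Spec_get_neighbors_2d num_rows num_cols cell (get_neighbors_2d num_rows num_cols cell)

-- ===== LEMMAS AND PROOFS =====

-- membership in the full board set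
lemma mem_foldl_cons (r : Int) (x : List Int) :
    ∀ (cs : List Int) (s : List (List Int)),
      x ∈ cs.foldl (fun s c => [r, c] :: s) s ↔ x ∈ s ∨ ∃ c ∈ cs, x = [r, c] := by
  intro cs
  induction cs with
  | nil => intro s; simp
  | cons c cs ih =>
    intro s
    rw [List.foldl_cons, ih]
    simp only [List.mem_cons]
    constructor
    · rintro ((rfl | hx) | ⟨c', hc', rfl⟩)
      · exact Or.inr ⟨c, Or.inl rfl, rfl⟩
      · exact Or.inl hx
      · exact Or.inr ⟨c', Or.inr hc', rfl⟩
    · rintro (hx | ⟨c', (rfl | hc'), rfl⟩)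
      · exact Or.inl (Or.inr hx)
      · exact Or.inl (Or.inl rfl)
      · exact Or.inr ⟨c', hc', rfl⟩

lemma mem_foldl_rows (cs : List Int) (x : List Int) :
    ∀ (rs : List Int) (s : PySem.Set (List Int)),
      x ∈ rs.foldl (fun s r => cs.foldl (fun s c => [r, c] :: s) s) s ↔
        x ∈ s ∨ ∃ r ∈ rs, ∃ c ∈ cs, x = [r, c] := by
  intro rs
  induction rs with
  | nil => intro s; simp
  | cons r rs ih =>
    intro s
    rw [List.foldl_cons, ih, mem_foldl_cons r x cs s]
    constructor
    · rintro ((hx | ⟨c, hc, rfl⟩) | ⟨r', hr', c, hc, rfl⟩)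
      · exact Or.inl hx
      · exact Or.inr ⟨r, List.mem_cons_self .., c, hc, rfl⟩
      · exact Or.inr ⟨r', List.mem_cons_of_mem _ hr', c, hc, rfl⟩
    · rintro (hx | ⟨r', hr', c, hc, rfl⟩)
      · exact Or.inl (Or.inl hx)
      · rcases List.mem_cons.mp hr' with rfl | hr'
        · exact Or.inl (Or.inr ⟨c, hc, rfl⟩)
        · exact Or.inr ⟨r', hr', c, hc, rfl⟩

lemma mem_all_cells (num_rows num_cols : Int) (x : List Int) :
    x ∈ get_all_cells_2d num_rows num_cols ↔
      ∃ r ∈ PySem.List.pyRange 0 num_rows 1, ∃ c ∈ PySem.List.pyRange 0 num_cols 1, x = [r, c] := by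
  unfold get_all_cells_2d
  rw [mem_foldl_rows]
  simp [PySem.Set.empty]

lemma contains_all_cells (num_rows num_cols a b : Int) :
    PySem.Set.contains (get_all_cells_2d num_rows num_cols) [a, b] =
      decide (0 ≤ a ∧ a < num_rows ∧ 0 ≤ b ∧ b < num_cols) := by
  have h : PySem.Set.contains (get_all_cells_2d num_rows num_cols) [a, b] = true ↔
      (0 ≤ a ∧ a < num_rows ∧ 0 ≤ b ∧ b < num_cols) := by
    rw [PySem.Set.contains_iff, mem_all_cells]
    constructor
    · rintro ⟨r, hr, c, hc, h⟩
      rw [PySem.List.mem_pyRange_one] at hr hc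
      obtain ⟨rfl, rfl⟩ : a = r ∧ b = c := by simpa using h
      exact ⟨hr.1, hr.2, hc.1, hc.2⟩
    · rintro ⟨h1, h2, h3, h4⟩
      exact ⟨a, PySem.List.mem_pyRange_one.mpr ⟨h1, h2⟩, b, PySem.List.mem_pyRange_one.mpr ⟨h3, h4⟩, rfl⟩
  rw [Bool.eq_iff_iff, decide_eq_true_iff]
  exact h

-- filter over the mapped candidates is the filterMap over the deltas
lemma filter_map_eq_filterMap {α β : Type} (f : α → β) (p : β → Bool) (c : α → Prop)
    [DecidablePred c] (h : ∀ d, p (f d) = decide (c d)) :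
    ∀ l : List α, (l.map f).filter p = l.filterMap (fun d => if c d then some (f d) else none) := by
  intro l
  induction l with
  | nil => rfl
  | cons d l ih =>
    rw [List.map_cons, List.filter_cons, List.filterMap_cons, h d]
    by_cases hc : c d
    · simp [hc, ih]
    · simp [hc, ih]

-- folding "if p n then add" over a nodup list of fresh elements is append-filter
lemma foldl_addif (p : List Int → Bool) :
    ∀ (l : List (List Int)) (acc : PySem.Set (List Int)), l.Nodup → (∀ x ∈ l, x ∉ acc) →
      l.foldl (fun s n => if p n then PySem.Set.add s n else s) acc = acc ++ l.filter p := by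
  intro l
  induction l with
  | nil => intro acc _ _; simp
  | cons x xs ih =>
    intro acc hnd hfresh
    have hnd' := (List.nodup_cons.mp hnd).2
    have hx : x ∉ acc := hfresh x (List.mem_cons_self ..)
    rw [List.foldl_cons]
    by_cases hp : p x = true
    · rw [if_pos hp, PySem.Set.add_of_not_mem hx,
        ih (acc ++ [x]) hnd' (by
          intro y hy
          simp only [List.mem_append, List.mem_singleton]
          rintro (h | rfl)
          · exact hfresh y (List.mem_cons_of_mem _ hy) h
          · exact (List.nodup_cons.mp hnd).1 hy)]
      simp [hp]
    · rw [if_neg hp, ih acc hnd' (fun y hy => hfresh y (List.mem_cons_of_mem _ hy))]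
      simp [hp]

-- ===== VERDICT (by name: the statement is the Claim_ definition above) =====
theorem get_neighbors_2d_spec : Claim_equal_get_neighbors_2d := by
  intro num_rows num_cols cell _hdom _hpre
  simp only [Spec_get_neighbors_2d, get_neighbors_2d, get_neighbors_2d_alt]
  set row := PySem.List.pyGetD cell 0 0 with hrow
  set col := PySem.List.pyGetD cell 1 0 with hcol
  have hnd : ([[row - 1, col - 1], [row - 1, col], [row - 1, col + 1],
      [row, col - 1], [row, col + 1],
      [row + 1, col - 1], [row + 1, col], [row + 1, col + 1]] : List (List Int)).Nodup := by
    simp only [List.nodup_cons, List.mem_cons, List.not_mem_nil, List.cons.injEq, and_true,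
      true_and, not_or, not_false_eq_true, List.nodup_nil]
    omega
  rw [PySem.Set.ofList_eq_self_of_nodup _ hnd]
  rw [foldl_addif _ _ PySem.Set.empty hnd (by intro y _ h; cases h)]
  simp only [PySem.Set.empty, List.nil_append]
  have hmap : ([[row - 1, col - 1], [row - 1, col], [row - 1, col + 1],
      [row, col - 1], [row, col + 1],
      [row + 1, col - 1], [row + 1, col], [row + 1, col + 1]] : List (List Int)) =
      ([(-1, -1), (-1, 0), (-1, 1), (0, -1), (0, 1), (1, -1), (1, 0), (1, 1)] : List (Int × Int)).map
        (fun d => [row + d.1, col + d.2]) := by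
    simp [sub_eq_add_neg]
  rw [hmap]
  exact filter_map_eq_filterMap (fun d : Int × Int => [row + d.1, col + d.2])
    (fun n => PySem.Set.contains (get_all_cells_2d num_rows num_cols) n)
    (fun d : Int × Int => 0 ≤ row + d.1 ∧ row + d.1 < num_rows ∧ 0 ≤ col + d.2 ∧ col + d.2 < num_cols)
    (fun d : Int × Int => contains_all_cells num_rows num_cols (row + d.1) (col + d.2)) _
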